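-- pv_equiv track=rewrite | github.com/amro1260/bfs-agent-prototype | multi_agent_bfs.py | bfs_spawn
-- ===== SOURCE A (Python) =====
-- from typing import List, Dict, Tuple, Optional
-- from collections import deque
--
-- def bfs_spawn(roles: List[str], max_depth: int) -> Dict[int, List[str]]:
--     if max_depth < 0:
--         raise ValueError("max_depth must be >= 0")
--     if not roles:
--         raise ValueError("roles must be non-empty")
--
--     levels: Dict[int, List[str]] = {}
--     q: deque[Tuple[int, str]] = deque()
--     q.append((0, roles[0]))
--     seen = 0
--
--     while q:
--         depth, role = q.popleft()
--         levels.setdefault(depth, []).append(role)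
--         if depth >= max_depth:
--             continue
--         next_depth = depth + 1
--         for i in range(len(roles)):
--             child_role = roles[(seen + i) % len(roles)]
--             q.append((next_depth, child_role))
--         seen += 1
--     return levels
-- ===== SOURCE B (Python) =====
-- def bfs_spawn(roles, max_depth):
--     if max_depth < 0:
--         raise ValueError("max_depth must be >= 0")
--     if not roles:
--         raise ValueError("roles must be non-empty")
--     n = len(roles)
--     levels = {0: [roles[0]]}
--     current = [roles[0]]
--     seen = 0
--     for depth in range(max_depth):
--         nxt = []
--         for _ in current:
--             for i in range(n):
--                 nxt.append(roles[(seen + i) % n])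
--             seen += 1
--         levels[depth + 1] = nxt
--         current = nxt
--     return levels
-- ===== Notes on version B (the rewrite author's own statement) =====
-- stated objective: alternative
-- what changed: Replaced A's single FIFO deque of (depth, role) pairs processed node-by-node with a level-synchronous iteration: one outer loop over depths that builds each whole next level as a list and stores it directly, so no queue and no per-node depth bookkeeping exist.
import Mathlib
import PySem

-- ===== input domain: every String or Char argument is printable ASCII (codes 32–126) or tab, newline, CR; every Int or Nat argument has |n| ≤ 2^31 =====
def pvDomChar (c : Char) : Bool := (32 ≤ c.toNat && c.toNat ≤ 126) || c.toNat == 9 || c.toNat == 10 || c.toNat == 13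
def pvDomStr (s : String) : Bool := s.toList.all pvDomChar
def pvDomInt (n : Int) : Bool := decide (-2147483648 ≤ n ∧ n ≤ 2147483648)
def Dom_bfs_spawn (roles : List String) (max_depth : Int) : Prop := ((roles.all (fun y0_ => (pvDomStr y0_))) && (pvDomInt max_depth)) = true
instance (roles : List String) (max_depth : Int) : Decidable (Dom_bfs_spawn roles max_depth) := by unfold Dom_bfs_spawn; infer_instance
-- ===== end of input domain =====

-- B replaces A's FIFO deque of (depth, role) nodes with a level-synchronous loop over depths
-- that builds each next level as one list (an alternative decomposition, same cost).

-- used only by bfsA_loop's termination proof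
lemma sum_map_map_const {α β : Type} (l : List α) (g : α → β) (w : β → Nat) (c : Nat)
    (h : ∀ a ∈ l, w (g a) = c) : ((l.map g).map w).sum = l.length * c := by
  induction l with
  | nil => simp
  | cons x xs ih =>
    simp only [List.map_cons, List.sum_cons, List.length_cons]
    rw [h x (List.mem_cons_self), ih (fun a ha => h a (List.mem_cons_of_mem _ ha))]
    ring

-- used only by bfsA_loop's termination proof (the non-spawning pop)
lemma bfsA_wf_pop (rl : Nat) (md d : Int) (r : String) (rest : List (Int × String)) :
    (rest.map (fun p => (rl + 1) ^ ((md - p.1).toNat + 1))).sum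
      < (((d, r) :: rest).map (fun p => (rl + 1) ^ ((md - p.1).toNat + 1))).sum := by
  rw [List.map_cons, List.sum_cons]
  exact Nat.lt_add_of_pos_left (Nat.pow_pos (Nat.succ_pos _))

-- used only by bfsA_loop's termination proof (generic shape of the spawning pop)
lemma bfsA_wf_key {A B : Type} (rest : List A) (ch : List B) (g : B → A) (w : A → Nat)
    (x : A) (c : Nat) (hc : ∀ b ∈ ch, w (g b) = c) (hlt : ch.length * c < w x) :
    ((rest ++ ch.map g).map w).sum < ((x :: rest).map w).sum := by
  rw [List.map_cons, List.sum_cons, List.map_append, List.sum_append,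
      sum_map_map_const ch g w c hc]
  calc (rest.map w).sum + ch.length * c < (rest.map w).sum + w x := Nat.add_lt_add_left hlt _
    _ = w x + (rest.map w).sum := Nat.add_comm _ _

-- used only by bfsA_loop's termination proof (the spawning pop)
lemma bfsA_wf_spawn (roles : List String) (md d seen : Int) (r : String)
    (rest : List (Int × String)) (hlt : ¬ d ≥ md) :
    ((rest ++ (PySem.List.pyRange 0 (roles.length : Int) 1).map
        (fun i => (d + 1, PySem.List.pyGetD roles (PySem.Int.mod (seen + i) (roles.length : Int)) ""))).map
      (fun p => (roles.length + 1) ^ ((md - p.1).toNat + 1))).sum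
      < (((d, r) :: rest).map (fun p => (roles.length + 1) ^ ((md - p.1).toNat + 1))).sum := by
  refine bfsA_wf_key rest _ _ _ (d, r) ((roles.length + 1) ^ ((md - (d + 1)).toNat + 1))
    (fun b _ => rfl) ?_
  have hd2 : (0 : Int) ≤ md - (d + 1) :=
    Int.sub_nonneg.mpr (Int.add_one_le_iff.mpr (lt_of_not_ge hlt))
  have he : (md - d).toNat = (md - (d + 1)).toNat + 1 := by
    rw [show md - d = (md - (d + 1)) + 1 from by ring, Int.toNat_add hd2 (by decide)]; rfl
  have hX : 0 < (roles.length + 1) ^ ((md - (d + 1)).toNat + 1) :=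
    Nat.pow_pos (Nat.succ_pos _)
  have hlen : (PySem.List.pyRange 0 (roles.length : Int) 1).length = roles.length := by
    simp [PySem.List.length_pyRange_one]
  rw [hlen]
  show roles.length * _ < (roles.length + 1) ^ ((md - (d, r).1).toNat + 1)
  rw [he, pow_succ, Nat.mul_comm roles.length]
  exact Nat.mul_lt_mul_of_le_of_lt (Nat.le_refl _) (Nat.lt_succ_self _) hX

-- ===== PORT A =====
-- A's while-loop over the deque; `levels.setdefault(depth, []).append(role)` is ported as
-- `levels.insert depth (levels.getD depth [] ++ [role])`, which yields the identical dict
-- (same key position for an existing key, appended at the end for a fresh one).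
def bfsA_loop (roles : List String) (max_depth : Int)
    (levels : PySem.Dict Int (List String)) (q : List (Int × String)) (seen : Int) :
    PySem.Dict Int (List String) :=
  match q with
  | [] => levels
  | (depth, role) :: rest =>
    let levels' := levels.insert depth (levels.getD depth [] ++ [role])
    if depth ≥ max_depth then
      bfsA_loop roles max_depth levels' rest seen
    else
      let children := (PySem.List.pyRange 0 (roles.length : Int) 1).map
        (fun i => (depth + 1, PySem.List.pyGetD roles (PySem.Int.mod (seen + i) (roles.length : Int)) ""))
      bfsA_loop roles max_depth levels' (rest ++ children) (seen + 1)
termination_by (q.map (fun p => (roles.length + 1) ^ ((max_depth - p.1).toNat + 1))).sum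
decreasing_by
  · exact bfsA_wf_pop roles.length max_depth depth role rest
  · rename_i hlt
    exact bfsA_wf_spawn roles max_depth depth seen role rest hlt

def bfs_spawn (roles : List String) (max_depth : Int) : List (Int × List String) :=
  if max_depth < 0 then []        -- Python raises ValueError here; excluded by Pre_
  else if roles = [] then []      -- Python raises ValueError here; excluded by Pre_
  else (bfsA_loop roles max_depth PySem.Dict.empty [(0, PySem.List.pyGetD roles 0 "")] 0).items

-- ===== PORT B =====
-- the body of B's `for depth in range(max_depth)` loop: state = (levels, current, seen)
def bfsB_step (roles : List String)
    (st : PySem.Dict Int (List String) × List String × Int) (depth : Int) :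
    PySem.Dict Int (List String) × List String × Int :=
  let p := st.2.1.foldl
    (fun (acc : List String × Int) _ =>
      ((PySem.List.pyRange 0 (roles.length : Int) 1).foldl
        (fun l i => l ++ [PySem.List.pyGetD roles (PySem.Int.mod (acc.2 + i) (roles.length : Int)) ""]) acc.1,
       acc.2 + 1))
    (([] : List String), st.2.2)
  (st.1.insert (depth + 1) p.1, p.1, p.2)

def bfs_spawn_alt (roles : List String) (max_depth : Int) : List (Int × List String) :=
  if max_depth < 0 then []
  else if roles = [] then []
  else
    ((PySem.List.pyRange 0 max_depth 1).foldl (bfsB_step roles)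
      (PySem.Dict.empty.insert 0 [PySem.List.pyGetD roles 0 ""],
       [PySem.List.pyGetD roles 0 ""], (0 : Int))).1.items

-- ===== PRECONDITION & SPEC =====
-- Pre_ excludes exactly the two explicit ValueError guards of A (max_depth < 0, empty roles);
-- B raises the same errors there.
def Pre_bfs_spawn (roles : List String) (max_depth : Int) : Prop :=
  0 ≤ max_depth ∧ roles ≠ []
instance (roles : List String) (max_depth : Int) : Decidable (Pre_bfs_spawn roles max_depth) := by
  unfold Pre_bfs_spawn; infer_instance
def pvWitness_bfs_spawn : List String × Int := (["a", "b"], 2)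

def Spec_bfs_spawn (roles : List String) (max_depth : Int) (out : List (Int × List String)) : Prop := out = bfs_spawn_alt roles max_depth
instance (roles : List String) (max_depth : Int) (out : List (Int × List String)) : Decidable (Spec_bfs_spawn roles max_depth out) := by unfold Spec_bfs_spawn; infer_instance

-- ===== CLAIM (what is proved, stated in full; the proofs are below) =====
def Claim_equal_bfs_spawn : Prop := ∀ (roles : List String) (max_depth : Int), Dom_bfs_spawn roles max_depth → Pre_bfs_spawn roles max_depth → Spec_bfs_spawn roles max_depth (bfs_spawn roles max_depth)

-- ===== LEMMAS AND PROOFS =====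

-- the children the spawning node with counter s appends
def rotRow (roles : List String) (s : Int) : List String :=
  (PySem.List.pyRange 0 (roles.length : Int) 1).map
    (fun i => PySem.List.pyGetD roles (PySem.Int.mod (s + i) (roles.length : Int)) "")

-- next-level contents produced by m spawning nodes starting at counter s
def rowNext (roles : List String) (s : Int) : Nat → List String
  | 0 => []
  | m + 1 => rotRow roles s ++ rowNext roles (s + 1) m

-- A's setdefault-append step folded over a whole level
def pushRow (levels : PySem.Dict Int (List String)) (d : Int) (cur : List String) :
    PySem.Dict Int (List String) :=
  cur.foldl (fun lv r => lv.insert d (lv.getD d [] ++ [r])) levels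

lemma foldl_app_singleton (l : List Int) (g : Int → String) (l0 : List String) :
    l.foldl (fun a x => a ++ [g x]) l0 = l0 ++ l.map g := by
  induction l generalizing l0 with
  | nil => simp
  | cons x xs ih => simp [List.foldl_cons, ih]

lemma length_rotRow (roles : List String) (s : Int) : (rotRow roles s).length = roles.length := by
  simp [rotRow, PySem.List.length_pyRange_one]

lemma rowNext_ne_nil (roles : List String) (s : Int) (m : Nat)
    (hr : roles ≠ []) (hm : 0 < m) : rowNext roles s m ≠ [] := by
  cases m with
  | zero => omega
  | succ m =>
    simp only [rowNext]
    intro h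
    have := congrArg List.length h
    simp [length_rotRow] at this
    exact hr this.1

lemma inner_eq (roles : List String) (cur : List String) (l0 : List String) (s : Int) :
    cur.foldl
      (fun (acc : List String × Int) _ =>
        ((PySem.List.pyRange 0 (roles.length : Int) 1).foldl
          (fun l i => l ++ [PySem.List.pyGetD roles (PySem.Int.mod (acc.2 + i) (roles.length : Int)) ""]) acc.1,
         acc.2 + 1)) (l0, s)
    = (l0 ++ rowNext roles s cur.length, s + cur.length) := by
  induction cur generalizing l0 s with
  | nil => simp [rowNext]
  | cons c cur ih =>
    simp only [List.foldl_cons]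
    rw [foldl_app_singleton]
    rw [ih (l0 ++ _) (s + 1)]
    simp only [rowNext, rotRow, List.length_cons, Prod.mk.injEq]
    refine ⟨by simp [List.append_assoc], by push_cast; ring⟩

lemma pushRow_cons (levels : PySem.Dict Int (List String)) (d : Int) (r : String)
    (cur : List String) :
    pushRow levels d (r :: cur) = levels.insert d (levels.getD d [] ++ (r :: cur)) := by
  induction cur generalizing levels r with
  | nil => rfl
  | cons r' cur ih =>
    show pushRow (levels.insert d (levels.getD d [] ++ [r])) d (r' :: cur) = _
    rw [ih]
    rw [PySem.Dict.getD_insert_self, PySem.Dict.insert_insert_self]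
    simp [List.append_assoc]

lemma pushRow_fresh (levels : PySem.Dict Int (List String)) (d : Int) (r : String)
    (cur : List String) (h : levels.contains d = false) :
    pushRow levels d (r :: cur) = levels.insert d (r :: cur) := by
  rw [pushRow_cons]
  rw [PySem.Dict.getD_of_not_contains (h := h)]
  rfl

lemma not_contains_of_keys_lt (levels : PySem.Dict Int (List String)) (d : Int)
    (h : ∀ j ∈ levels.keys, j < d) : levels.contains d = false := by
  by_contra hc
  have hc' : levels.contains d = true := by
    cases hcc : levels.contains d
    · exact absurd hcc hc
    · rfl
  have : d ∈ levels.keys := (PySem.Dict.contains_iff_mem_keys _ _).mp hc'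
  exact absurd (h d this) (lt_irrefl d)

lemma loopA_flat (roles : List String) (max_depth d : Int)
    (levels : PySem.Dict Int (List String)) (cur : List String) (seen : Int)
    (hd : max_depth ≤ d) :
    bfsA_loop roles max_depth levels (cur.map (fun r => (d, r))) seen
      = pushRow levels d cur := by
  induction cur generalizing levels with
  | nil => rw [bfsA_loop.eq_def]; rfl
  | cons c cur ih =>
    rw [bfsA_loop.eq_def]
    simp only [List.map_cons]
    rw [if_pos hd]
    exact ih _

lemma loopA_spawn (roles : List String) (max_depth d : Int)
    (cur : List String) (built : List String)
    (levels : PySem.Dict Int (List String)) (seen : Int)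
    (hd : d < max_depth) :
    bfsA_loop roles max_depth levels
        (cur.map (fun r => (d, r)) ++ built.map (fun r => (d + 1, r))) seen
      = bfsA_loop roles max_depth (pushRow levels d cur)
          ((built ++ rowNext roles seen cur.length).map (fun r => (d + 1, r)))
          (seen + cur.length) := by
  induction cur generalizing levels built seen with
  | nil => simp [rowNext, pushRow]
  | cons c cur ih =>
    conv_lhs => rw [bfsA_loop.eq_def]
    simp only [List.map_cons, List.cons_append]
    rw [if_neg (by omega : ¬ d ≥ max_depth)]
    have hch : (PySem.List.pyRange 0 (roles.length : Int) 1).map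
        (fun i => (d + 1, PySem.List.pyGetD roles (PySem.Int.mod (seen + i) (roles.length : Int)) ""))
        = (rotRow roles seen).map (fun r => (d + 1, r)) := by
      simp [rotRow, List.map_map, Function.comp]
    rw [show cur.map (fun r => (d, r)) ++ built.map (fun r => (d + 1, r)) ++
          (PySem.List.pyRange 0 (roles.length : Int) 1).map
            (fun i => (d + 1, PySem.List.pyGetD roles (PySem.Int.mod (seen + i) (roles.length : Int)) ""))
        = cur.map (fun r => (d, r)) ++ (built ++ rotRow roles seen).map (fun r => (d + 1, r)) by
      rw [hch]; simp [List.append_assoc]]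
    rw [ih (built ++ rotRow roles seen) _ (seen + 1)]
    show bfsA_loop roles max_depth (pushRow (levels.insert d (levels.getD d [] ++ [c])) d cur) _ _ = _
    have hpr : pushRow (levels.insert d (levels.getD d [] ++ [c])) d cur
        = pushRow levels d (c :: cur) := rfl
    rw [hpr]
    congr 1
    · simp [rowNext, List.append_assoc]
    · simp only [List.length_cons]
      push_cast
      ring

lemma main_inv (roles : List String) (max_depth : Int) (hr : roles ≠ []) :
    ∀ (k : Nat) (d : Int) (levels : PySem.Dict Int (List String)) (cur : List String) (seen : Int),
      (max_depth - d).toNat = k →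
      (∀ j ∈ levels.keys, j < d) →
      cur ≠ [] →
      bfsA_loop roles max_depth levels (cur.map (fun r => (d, r))) seen
        = ((PySem.List.pyRange d max_depth 1).foldl (bfsB_step roles)
            (levels.insert d cur, cur, seen)).1 := by
  intro k
  induction k with
  | zero =>
    intro d levels cur seen hk hkeys hcur
    have hd : max_depth ≤ d := by omega
    rw [PySem.List.pyRange_one_eq_nil hd]
    rw [loopA_flat roles max_depth d levels cur seen hd]
    obtain ⟨c, cur', rfl⟩ := List.exists_cons_of_ne_nil hcur
    rw [pushRow_fresh _ _ _ _ (not_contains_of_keys_lt _ _ hkeys)]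
    rfl
  | succ k ih =>
    intro d levels cur seen hk hkeys hcur
    have hd : d < max_depth := by omega
    rw [PySem.List.pyRange_one_cons hd]
    simp only [List.foldl_cons]
    obtain ⟨c, cur', rfl⟩ := List.exists_cons_of_ne_nil hcur
    have hstep : bfsB_step roles (levels.insert d (c :: cur'), c :: cur', seen) d
        = ((levels.insert d (c :: cur')).insert (d + 1) (rowNext roles seen (c :: cur').length),
           rowNext roles seen (c :: cur').length, seen + (c :: cur').length) := by
      simp only [bfsB_step]
      rw [inner_eq roles (c :: cur') [] seen]
      simp
    rw [hstep]
    have hnext := loopA_spawn roles max_depth d (c :: cur') [] levels seen hd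
    simp only [List.map_nil, List.append_nil, List.nil_append] at hnext
    rw [hnext]
    rw [pushRow_fresh _ _ _ _ (not_contains_of_keys_lt _ _ hkeys)]
    have hne : rowNext roles seen (c :: cur').length ≠ [] :=
      rowNext_ne_nil roles seen _ hr (by simp)
    have hkeys' : ∀ j ∈ (levels.insert d (c :: cur')).keys, j < d + 1 := by
      intro j hj
      rcases (PySem.Dict.mem_keys_insert _ _ _ _).mp hj with h | h
      · omega
      · have := hkeys j h
        omega
    exact ih (d + 1) (levels.insert d (c :: cur')) (rowNext roles seen (c :: cur').length)
        (seen + (c :: cur').length) (by omega) hkeys' hne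

-- ===== VERDICT (by name: the statement is the Claim_ definition above) =====
theorem bfs_spawn_spec : Claim_equal_bfs_spawn := by
  intro roles max_depth _ hpre
  obtain ⟨h0, hne⟩ := hpre
  unfold Spec_bfs_spawn bfs_spawn bfs_spawn_alt
  rw [if_neg (by omega : ¬ max_depth < 0), if_neg hne,
      if_neg (by omega : ¬ max_depth < 0), if_neg hne]
  congr 1
  have := main_inv roles max_depth hne max_depth.toNat 0 PySem.Dict.empty
      [PySem.List.pyGetD roles 0 ""] 0 (by omega)
      (by intro j hj; simp [PySem.Dict.keys_empty] at hj) (by simp)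
  simp only [List.map_cons, List.map_nil] at this
  exact this
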